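-- pv_equiv track=rewrite | github.com/crazybass81/T-Developer | backend/src/agents/implementations/search/performance_optimizer.py | _optimize_concurrency
-- ===== SOURCE A (Python) =====
-- from typing import Dict, List, Any, Optional
-- from collections import defaultdict
--
-- def _optimize_concurrency(
--
--     search_logs: List[Dict[str, Any]]
-- ) -> Dict[str, Any]:
--     """동시성 최적화"""
--
--     # 시간대별 쿼리 분포 분석
--     hourly_distribution = defaultdict(int)
--     for log in search_logs:
--         hour = log.get('timestamp', '').split('T')[1][:2] if 'timestamp' in log else '00'
--         hourly_distribution[hour] += 1
--
--     # 피크 시간대 식별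
--     peak_hour_queries = max(hourly_distribution.values()) if hourly_distribution else 10
--
--     # 최적 워커 수 계산 (피크 시간 기준)
--     optimal_workers = min(50, max(5, peak_hour_queries // 10))
--
--     # 커넥션 풀 크기 (워커의 2배)
--     optimal_connections = optimal_workers * 2
--
--     return {
--         'peak_queries_per_hour': peak_hour_queries,
--         'optimal_workers': optimal_workers,
--         'optimal_connections': optimal_connections
--     }
-- ===== SOURCE B (Python) =====
-- from typing import Dict, List, Any
--
-- def _optimize_concurrency(
--     search_logs: List[Dict[str, Any]]
-- ) -> Dict[str, Any]:
--     # Extract every hour first (identical per-element parse, same exceptions),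
--     # then find the peak as the longest block of equal consecutive values in
--     # the sorted hour list -- a sort-then-scan instead of a counting dict.
--     hours = [
--         log.get('timestamp', '').split('T')[1][:2] if 'timestamp' in log else '00'
--         for log in search_logs
--     ]
--     if hours:
--         hs = sorted(hours)
--         best = 0
--         while hs:
--             n = 1
--             while n < len(hs) and hs[n] == hs[0]:
--                 n += 1
--             if n > best:
--                 best = n
--             hs = hs[n:]
--         peak_hour_queries = best
--     else:
--         peak_hour_queries = 10
--     optimal_workers = min(50, max(5, peak_hour_queries // 10))
--     return {
--         'peak_queries_per_hour': peak_hour_queries,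
--         'optimal_workers': optimal_workers,
--         'optimal_connections': optimal_workers * 2
--     }
-- ===== Notes on version B (the rewrite author's own statement) =====
-- stated objective: alternative
-- what changed: Replaces the incrementally built defaultdict histogram with a sort-then-scan: the extracted hours are sorted and the peak is the length of the longest run of equal consecutive values, so no counting dictionary is maintained.
import Mathlib
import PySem

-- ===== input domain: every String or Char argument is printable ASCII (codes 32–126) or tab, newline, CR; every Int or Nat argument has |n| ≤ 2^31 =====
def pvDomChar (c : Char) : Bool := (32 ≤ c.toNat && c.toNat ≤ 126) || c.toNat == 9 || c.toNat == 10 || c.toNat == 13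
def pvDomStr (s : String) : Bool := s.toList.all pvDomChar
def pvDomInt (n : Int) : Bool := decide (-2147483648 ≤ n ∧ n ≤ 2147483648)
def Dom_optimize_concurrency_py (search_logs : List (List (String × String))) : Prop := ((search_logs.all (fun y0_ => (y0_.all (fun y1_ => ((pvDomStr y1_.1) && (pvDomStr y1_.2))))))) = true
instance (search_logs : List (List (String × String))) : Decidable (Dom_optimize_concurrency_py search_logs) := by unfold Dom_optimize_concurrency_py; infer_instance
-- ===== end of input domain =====

-- B replaces A's incrementally built histogram dict by a sort-then-scan: the peak is the
-- longest run of equal consecutive values in the sorted hour list (objective: alternative).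
-- Return-value equivalence; neither version mutates its argument.

-- ===== PORT A =====
-- hour = log.get('timestamp', '').split('T')[1][:2] if 'timestamp' in log else '00'
-- (none = the IndexError Python raises when the timestamp value contains no 'T');
-- this exact expression occurs verbatim in both Pythons, so both ports share it.
def pvHour (log : List (String × String)) : Option String :=
  let d := PySem.Dict.mk log
  if d.contains "timestamp" then
    match PySem.List.pyGet? ((PySem.Str.split? ((d.get? "timestamp").getD "") "T").getD []) 1 with
    | none => none
    | some s => some (PySem.Str.slice s none (some 2))
  else some "00"

-- the 'for log in search_logs: hourly_distribution[hour] += 1' loop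
def pvLoopA : List (List (String × String)) → PySem.Dict String Int → Option (PySem.Dict String Int)
  | [], d => some d
  | log :: rest, d =>
    match pvHour log with
    | none => none
    | some h => pvLoopA rest (d.modify h 0 (· + 1))

def optimize_concurrency_py (search_logs : List (List (String × String))) : List (String × Int) :=
  match pvLoopA search_logs PySem.Dict.empty with
  | none => []  -- unreachable under Pre_ (Python raises IndexError here)
  | some d =>
    let peak : Int := match PySem.List.max? d.values (fun x => x) with
                      | some m => m
                      | none => 10
    let workers : Int := min 50 (max 5 (PySem.Int.floordiv peak 10))
    [("peak_queries_per_hour", peak), ("optimal_workers", workers),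
     ("optimal_connections", workers * 2)]

-- ===== PORT B =====
-- hours = [ … hour of log … for log in search_logs]
def pvHoursB : List (List (String × String)) → Option (List String)
  | [] => some []
  | log :: rest =>
    match pvHour log, pvHoursB rest with
    | some h, some hs => some (h :: hs)
    | _, _ => none

-- the 'while hs: n = 1; while n < len(hs) and hs[n] == hs[0]: n += 1; best = max; hs = hs[n:]'
-- scan: the inner while takes the leading run of elements equal to hs[0], the slice drops it
def pvLongestRun : List String → Int → Int
  | [], best => best
  | a :: t, best =>
    let n : Int := (t.takeWhile (fun x => x == a)).length + 1
    pvLongestRun (t.dropWhile (fun x => x == a)) (if n > best then n else best)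
termination_by l _ => l.length
decreasing_by
  simp only [List.length_cons]
  have := List.length_dropWhile_le (fun x => x == a) t
  omega

def optimize_concurrency_py_alt (search_logs : List (List (String × String))) : List (String × Int) :=
  match pvHoursB search_logs with
  | none => []  -- unreachable under Pre_ (Python raises IndexError here)
  | some hours =>
    let peak : Int :=
      match hours with
      | [] => 10          -- 'if hours: … else: peak = 10'
      | _ :: _ => pvLongestRun (PySem.List.sorted hours (fun x => x) false) 0
    let workers : Int := min 50 (max 5 (PySem.Int.floordiv peak 10))
    [("peak_queries_per_hour", peak), ("optimal_workers", workers),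
     ("optimal_connections", workers * 2)]

-- ===== PRECONDITION & SPEC =====
-- Pre_ excludes logs with a 'timestamp' key whose value contains no 'T' (split('T') yields
-- fewer than two pieces): there Python A raises IndexError (and B does the same).
def Pre_optimize_concurrency_py (search_logs : List (List (String × String))) : Prop :=
  ∀ log ∈ search_logs, (PySem.Dict.mk log).contains "timestamp" = true →
    2 ≤ ((PySem.Str.split? (((PySem.Dict.mk log).get? "timestamp").getD "") "T").getD []).length
instance (search_logs : List (List (String × String))) : Decidable (Pre_optimize_concurrency_py search_logs) := by unfold Pre_optimize_concurrency_py; infer_instance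

def pvWitness_optimize_concurrency_py : (List (List (String × String))) :=
  [[("timestamp", "2024-01-01T12:00:00"), ("query", "cats")], [("query", "dogs")], []]

def Spec_optimize_concurrency_py (search_logs : List (List (String × String))) (out : List (String × Int)) : Prop := out = optimize_concurrency_py_alt search_logs
instance (search_logs : List (List (String × String))) (out : List (String × Int)) : Decidable (Spec_optimize_concurrency_py search_logs out) := by unfold Spec_optimize_concurrency_py; infer_instance

-- ===== CLAIM (what is proved, stated in full; the proofs are below) =====
def Claim_equal_optimize_concurrency_py : Prop := ∀ (search_logs : List (List (String × String))), Dom_optimize_concurrency_py search_logs → Pre_optimize_concurrency_py search_logs → Spec_optimize_concurrency_py search_logs (optimize_concurrency_py search_logs)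

-- ===== LEMMAS AND PROOFS =====

-- under Pre_'s per-log condition the hour extraction succeeds
lemma pvHour_isSome (log : List (String × String))
    (h : (PySem.Dict.mk log).contains "timestamp" = true →
      2 ≤ ((PySem.Str.split? (((PySem.Dict.mk log).get? "timestamp").getD "") "T").getD []).length) :
    (pvHour log).isSome := by
  unfold pvHour
  by_cases hc : (PySem.Dict.mk log).contains "timestamp" = true
  · simp only [hc, if_true]
    have hlen := h hc
    set pieces := ((PySem.Str.split? (((PySem.Dict.mk log).get? "timestamp").getD "") "T").getD []) with hp
    have : PySem.List.pyGet? pieces (1 : Int) = pieces[1]? := by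
      exact_mod_cast PySem.List.pyGet?_natCast pieces 1
    rw [this]
    have h1 : 1 < pieces.length := by omega
    simp [List.getElem?_eq_getElem h1]
  · simp [hc]

-- A's loop is B's hour list folded into the same counter updates
lemma pvLoopA_eq_hoursB (logs : List (List (String × String))) :
    ∀ d : PySem.Dict String Int,
      pvLoopA logs d =
        (pvHoursB logs).map (fun hs => hs.foldl (fun d h => d.modify h 0 (· + 1)) d) := by
  induction logs with
  | nil => intro d; simp [pvLoopA, pvHoursB]
  | cons log rest ih =>
    intro d
    cases hh : pvHour log with
    | none => simp [pvLoopA, pvHoursB, hh]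
    | some h =>
      cases hr : pvHoursB rest with
      | none => simp [pvLoopA, pvHoursB, hh, hr, ih]
      | some hs => simp [pvLoopA, pvHoursB, hh, hr, ih]

-- under Pre_ the hour list exists
lemma pvHoursB_isSome (logs : List (List (String × String)))
    (hpre : Pre_optimize_concurrency_py logs) : (pvHoursB logs).isSome := by
  induction logs with
  | nil => simp [pvHoursB]
  | cons log rest ih =>
    have h1 : (pvHour log).isSome := pvHour_isSome log (hpre log (by simp))
    have h2 : (pvHoursB rest).isSome := by
      apply ih
      intro l hl
      exact hpre l (by simp [hl])
    obtain ⟨h, hh⟩ := Option.isSome_iff_exists.mp h1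
    obtain ⟨hs, hhs⟩ := Option.isSome_iff_exists.mp h2
    simp [pvHoursB, hh, hhs]

-- the run scan on a sorted list: lower bound, attainment, and upper bound by counts
lemma pvLongestRun_aux : ∀ (k : Nat) (l : List String), l.length ≤ k → l.Pairwise (· ≤ ·) → ∀ b : Int,
    b ≤ pvLongestRun l b ∧
    (pvLongestRun l b = b ∨ ∃ h ∈ l, (l.count h : Int) = pvLongestRun l b) ∧
    (∀ h ∈ l, (l.count h : Int) ≤ pvLongestRun l b) := by
  intro k
  induction k with
  | zero =>
    intro l hl _ b
    have : l = [] := List.eq_nil_of_length_eq_zero (Nat.le_zero.mp hl)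
    subst this
    simp [pvLongestRun]
  | succ k ih =>
    intro l hl hp b
    cases l with
    | nil => simp [pvLongestRun]
    | cons a t =>
      set tw := t.takeWhile (fun x => x == a) with htw_def
      set dw := t.dropWhile (fun x => x == a) with hdw_def
      have hsplit : t = tw ++ dw := (List.takeWhile_append_dropWhile).symm
      have htw : ∀ x ∈ tw, x = a := by
        intro x hx
        have := List.mem_takeWhile_imp hx
        simpa using this
      have hpc := List.pairwise_cons.mp hp
      have hrel : ∀ y ∈ t, a ≤ y := hpc.1
      have hpt : t.Pairwise (· ≤ ·) := hpc.2
      have hdw_sub : dw.Sublist t := List.dropWhile_sublist _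
      have hdw_pair : dw.Pairwise (· ≤ ·) := hpt.sublist hdw_sub
      have ha_not : a ∉ dw := by
        intro ha
        cases hdwe : dw with
        | nil => rw [hdwe] at ha; exact absurd ha (List.not_mem_nil)
        | cons y ys =>
          have hne : dw ≠ [] := by rw [hdwe]; simp
          have hy : (fun x => x == a) (dw.head hne) = false := List.head_dropWhile_not _ hne
          have hhead : dw.head hne = y := by simp [hdwe]
          rw [hhead] at hy
          have hya : y ≠ a := by simpa using hy
          rw [hdwe] at ha
          rcases List.mem_cons.mp ha with h | h
          · exact hya h.symm
          · have h1 : a ≤ y := hrel y (hdw_sub.mem (by rw [hdwe]; exact List.mem_cons_self))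
            have h2 : y ≤ a := (List.pairwise_cons.mp (hdwe ▸ hdw_pair)).1 a h
            exact hya (le_antisymm h2 h1)
      -- count of a in the whole list is the run length
      have hcount_a : (a :: t).count a = tw.length + 1 := by
        rw [List.count_cons_self, hsplit, List.count_append]
        have h1 : tw.count a = tw.length := List.count_eq_length.mpr (fun b hb => (htw b hb).symm)
        have h2 : dw.count a = 0 := List.count_eq_zero.mpr ha_not
        omega
      have hcount_dw : ∀ x ∈ dw, (a :: t).count x = dw.count x := by
        intro x hx
        have hxa : x ≠ a := fun he => ha_not (he ▸ hx)
        have hcc : (a :: t).count x = t.count x := by simp [Ne.symm hxa]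
        rw [hcc, hsplit, List.count_append]
        have : tw.count x = 0 := List.count_eq_zero.mpr (fun hm => hxa (htw x hm))
        omega
      have hdw_len : dw.length ≤ k := by
        have h1 : dw.length ≤ t.length := by
          rw [hdw_def]; exact List.length_dropWhile_le _ t
        simp only [List.length_cons] at hl
        omega
      -- unfold one step of the scan
      set n : Int := (tw.length : Int) + 1 with hn_def
      set b' : Int := if n > b then n else b with hb'_def
      have hunfold : pvLongestRun (a :: t) b = pvLongestRun dw b' := by
        rw [pvLongestRun]
      obtain ⟨ih1, ih2, ih3⟩ := ih dw hdw_len hdw_pair b'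
      set r := pvLongestRun dw b' with hr_def
      have hb_le : b ≤ b' := by rw [hb'_def]; split <;> omega
      have hn_le : n ≤ b' := by rw [hb'_def]; split <;> omega
      rw [hunfold]
      refine ⟨le_trans hb_le ih1, ?_, ?_⟩
      · rcases ih2 with h | ⟨h, hm, hc⟩
        · by_cases hgt : n > b
          · right
            refine ⟨a, List.mem_cons_self, ?_⟩
            rw [hcount_a, h, hb'_def, if_pos hgt, hn_def]
            push_cast; ring
          · left; rw [h, hb'_def, if_neg hgt]
        · right
          exact ⟨h, List.mem_cons_of_mem a (hdw_sub.mem hm), by rw [hcount_dw h hm]; exact hc⟩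
      · intro h hm
        rcases List.mem_cons.mp hm with he | hmt
        · subst he
          rw [hcount_a]
          have : ((tw.length + 1 : Nat) : Int) = n := by rw [hn_def]; push_cast; ring
          rw [this]
          exact le_trans hn_le ih1
        · rw [hsplit] at hmt
          rcases List.mem_append.mp hmt with h1 | h1
          · have := htw h h1; subst this
            rw [hcount_a]
            have : ((tw.length + 1 : Nat) : Int) = n := by rw [hn_def]; push_cast; ring
            rw [this]
            exact le_trans hn_le ih1
          · rw [hcount_dw h h1]
            exact le_trans (ih3 h h1) le_rfl

lemma pvLongestRun_spec (l : List String) (hs : l.Pairwise (· ≤ ·)) (b : Int) :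
    b ≤ pvLongestRun l b ∧
    (pvLongestRun l b = b ∨ ∃ h ∈ l, (l.count h : Int) = pvLongestRun l b) ∧
    (∀ h ∈ l, (l.count h : Int) ≤ pvLongestRun l b) :=
  pvLongestRun_aux l.length l le_rfl hs b

lemma peak_eq (hours : List String) (hne : hours ≠ []) :
    (match PySem.List.max?
        ((hours.foldl (fun d h => d.modify h 0 (· + 1)) PySem.Dict.empty).values)
        (fun x => x) with
      | some m => m
      | none => (10 : Int))
    = pvLongestRun (PySem.List.sorted hours (fun x => x) false) 0 := by
  rw [← PySem.Dict.counter_eq_foldl]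
  have hv : (PySem.Dict.counter hours).values
      = (PySem.Set.ofList hours).map (fun h => (hours.count h : Int)) := by
    simp [PySem.Dict.values, PySem.Dict.items_counter, List.map_map, Function.comp]
  rw [hv]
  obtain ⟨x, t, rfl⟩ : ∃ x t, hours = x :: t := by
    cases hours with
    | nil => exact absurd rfl hne
    | cons x t => exact ⟨x, t, rfl⟩
  set hours := x :: t with hhours
  have hxmem : x ∈ PySem.Set.ofList hours := by
    exact (PySem.Set.mem_ofList _ _).mpr List.mem_cons_self
  have hcs_ne : (PySem.Set.ofList hours).map (fun h => (hours.count h : Int)) ≠ [] :=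
    List.ne_nil_of_mem (List.mem_map_of_mem hxmem)
  obtain ⟨m, hm⟩ : ∃ m, PySem.List.max?
      ((PySem.Set.ofList hours).map (fun h => (hours.count h : Int))) (fun x => x) = some m := by
    cases h : PySem.List.max? ((PySem.Set.ofList hours).map (fun h => (hours.count h : Int))) (fun x => x) with
    | none => exact absurd ((PySem.List.max?_eq_none_iff _ _).mp h) hcs_ne
    | some m => exact ⟨m, rfl⟩
  rw [hm]
  -- A-side: m is an attained count and an upper bound on all counts
  obtain ⟨h0, hh0, hh0m⟩ : ∃ h0 ∈ hours, (hours.count h0 : Int) = m := by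
    have := PySem.List.max?_mem hm
    obtain ⟨h0, hh0, he⟩ := List.mem_map.mp this
    exact ⟨h0, (PySem.Set.mem_ofList _ _).mp hh0, he⟩
  have hmax : ∀ h ∈ hours, (hours.count h : Int) ≤ m := by
    intro h hh
    have := PySem.List.max?_isMax hm ((hours.count h : Int))
      (List.mem_map_of_mem ((PySem.Set.mem_ofList _ _).mpr hh))
    exact this
  -- B-side: the longest sorted run is an attained count and an upper bound
  set s := PySem.List.sorted hours (fun x => x) false with hs_def
  have hperm : s.Perm hours := PySem.List.sorted_perm hours (fun x => x) false
  have hsp : s.Pairwise (· ≤ ·) := PySem.List.sorted_pairwise hours (fun x => x)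
  obtain ⟨h0le, hatt, hbnd⟩ := pvLongestRun_spec s hsp 0
  set r := pvLongestRun s 0 with hr_def
  have hcnt : ∀ h : String, s.count h = hours.count h := fun h => hperm.count_eq h
  have hs_ne : s ≠ [] := by
    intro h
    exact hne ((PySem.List.sorted_eq_nil_iff _ _ _).mp h)
  obtain ⟨h1, hh1, hh1r⟩ : ∃ h1 ∈ s, (s.count h1 : Int) = r := by
    rcases hatt with h | h
    · exfalso
      obtain ⟨y, ys, hys⟩ := List.exists_cons_of_ne_nil hs_ne
      have hy : y ∈ s := by rw [hys]; exact List.mem_cons_self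
      have := hbnd y hy
      have hpos : 0 < s.count y := List.count_pos_iff.mpr hy
      omega
    · exact h
  apply le_antisymm
  · rw [← hh0m, ← hcnt h0]
    exact hbnd h0 (hperm.mem_iff.mpr hh0)
  · rw [← hh1r, hcnt h1]
    exact hmax h1 (hperm.mem_iff.mp hh1)

-- ===== VERDICT (by name: the statement is the Claim_ definition above) =====
theorem optimize_concurrency_py_spec : Claim_equal_optimize_concurrency_py := by
  intro logs _ hpre
  unfold Spec_optimize_concurrency_py optimize_concurrency_py optimize_concurrency_py_alt
  obtain ⟨hours, hh⟩ := Option.isSome_iff_exists.mp (pvHoursB_isSome logs hpre)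
  rw [pvLoopA_eq_hoursB logs PySem.Dict.empty, hh]
  simp only [Option.map_some]
  cases hours with
  | nil => rfl
  | cons a t => rw [peak_eq (a :: t) (by simp)]
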